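-- pv_equiv track=rewrite | github.com/ernyeizoli/postbox_scripts | Applets/ACES-converter/PBV_ACES_converter.py | is_color_texture
-- ===== SOURCE A (Python) =====
-- TEXTURE_KEYWORDS = {
--     'texturesColor': ['diffuse', 'diff', 'albedo', 'alb', 'base', 'col', 'color', 'basecolor'],
--     'texturesMetal': ['metalic', 'metalness', 'metal', 'mtl', 'met'],
--     'texturesSpecular': ['specularity', 'specular', 'spec', 'spc'],
--     'texturesRough': ['roughness', 'rough', 'rgh'],
--     'texturesGloss': ['gloss', 'glossy', 'glossiness'],
--     'texturesTrans': ['transmisson', 'transparency', 'trans'],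
--     'texturesEmm': ['emission', 'emissive', 'emit', 'emm'],
--     'texturesAlpha': ['alpha', 'opacity', 'opac'],
--     'texturesBump': ['bump', 'bmp', 'height', 'displacement', 'displace', 'disp'],
--     'texturesNormal': ['normal', 'nor', 'nrm', 'nrml', 'norm']
-- }
--
-- def is_color_texture(filename):
--     """Check if a filename is a color/diffuse texture based on keywords."""
--     name_lower = filename.lower()
--     # Split by common separators to check individual parts
--     parts = name_lower.replace('-', '_').replace('.', '_').split('_')
--
--     color_keywords = TEXTURE_KEYWORDS['texturesColor']
--
--     # Check if any part matches a color keyword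
--     for part in parts:
--         if any(kw in part for kw in color_keywords):
--             return True
--     return False
-- ===== SOURCE B (Python) =====
-- _COLOR_KEYWORDS = ['diffuse', 'diff', 'albedo', 'alb', 'base', 'col', 'color', 'basecolor']
--
--
-- def _norm(c):
--     """Normalize one character: lower-case, separators '-' '.' become '_'."""
--     c = c.lower()
--     return '_' if c in '-.' else c
--
--
-- def _matches_at(s, i, kw):
--     """Does kw occur at position i of s, comparing normalized characters?"""
--     if i + len(kw) > len(s):
--         return False
--     for j, ch in enumerate(kw):
--         if _norm(s[i + j]) != ch:
--             return False
--     return True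
--
--
-- def is_color_texture(filename):
--     """Check if a filename is a color/diffuse texture based on keywords."""
--     # Scan every position of the raw string, normalizing characters on the
--     # fly; no lower/replace/split passes and no intermediate strings at all.
--     for i in range(len(filename) + 1):
--         for kw in _COLOR_KEYWORDS:
--             if _matches_at(filename, i, kw):
--                 return True
--     return False
-- ===== Notes on version B (the rewrite author's own statement) =====
-- stated objective: alternative
-- what changed: B replaces A's staged passes (lower, two replace passes, split into parts, substring test per part) by a single positional scanner over the raw string: at each index it tries to match each keyword character-by-character, normalizing characters on the fly, building no intermediate strings or parts list.
import Mathlib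
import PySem

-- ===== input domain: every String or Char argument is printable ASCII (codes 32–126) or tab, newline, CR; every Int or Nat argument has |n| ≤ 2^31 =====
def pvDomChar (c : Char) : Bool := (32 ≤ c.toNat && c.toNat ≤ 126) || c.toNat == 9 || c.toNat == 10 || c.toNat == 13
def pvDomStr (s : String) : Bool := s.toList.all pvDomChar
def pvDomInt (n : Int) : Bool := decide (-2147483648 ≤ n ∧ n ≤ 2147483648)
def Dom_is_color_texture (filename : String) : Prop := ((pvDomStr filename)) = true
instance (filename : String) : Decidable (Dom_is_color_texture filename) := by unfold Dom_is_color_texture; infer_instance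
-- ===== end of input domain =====

-- B replaces A's staged passes (lower, replace, split into parts, per-part substring test)
-- by a single positional scanner that matches keywords char-by-char with on-the-fly
-- normalization; equal because no color keyword contains a separator character.


-- ===== PORT A =====
-- TEXTURE_KEYWORDS['texturesColor'] (module constant A reads)
def colorKeywords : List (List Char) :=
  ["diffuse", "diff", "albedo", "alb", "base", "col", "color", "basecolor"].map String.toList

def is_color_texture (filename : String) : Bool :=
  let nameLower := PySem.Chars.lower filename.toList
  let parts := PySem.Chars.splitOn
    (PySem.Chars.replace (PySem.Chars.replace nameLower ['-'] ['_']) ['.'] ['_']) ['_']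
  -- 'for part in parts: if any(kw in part …): return True' / 'return False'
  parts.any (fun part => colorKeywords.any (fun kw => PySem.Chars.isIn kw part))

-- ===== PORT B =====
-- B's module constant _COLOR_KEYWORDS
def bColorKws : List (List Char) :=
  [['d','i','f','f','u','s','e'], ['d','i','f','f'], ['a','l','b','e','d','o'],
   ['a','l','b'], ['b','a','s','e'], ['c','o','l'], ['c','o','l','o','r'],
   ['b','a','s','e','c','o','l','o','r']]

-- _norm: lower-case one char, separators '-' '.' become '_'
def normChar (c : Char) : Char :=
  let c' := PySem.Chars.lowerChar c
  if c' = '-' || c' = '.' then '_' else c'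

-- _matches_at: kw at the head of this suffix, comparing normalized chars
-- (running off the end of the suffix = the Python length guard failing)
def matchesAt : List Char → List Char → Bool
  | [], _ => true
  | _ :: _, [] => false
  | k :: kt, c :: ct => (normChar c == k) && matchesAt kt ct

-- the 'for i in range(len+1)' loop: try every suffix, including the empty one
def colorScan : List Char → Bool
  | [] => bColorKws.any (fun kw => matchesAt kw [])
  | c :: t => bColorKws.any (fun kw => matchesAt kw (c :: t)) || colorScan t

def is_color_texture_alt (filename : String) : Bool :=
  colorScan filename.toList

-- ===== PRECONDITION & SPEC =====
def Spec_is_color_texture (filename : String) (out : Bool) : Prop := out = is_color_texture_alt filename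
instance (filename : String) (out : Bool) : Decidable (Spec_is_color_texture filename out) := by unfold Spec_is_color_texture; infer_instance

-- ===== CLAIM (what is proved, stated in full; the proofs are below) =====
def Claim_equal_is_color_texture : Prop := ∀ (filename : String), Dom_is_color_texture filename → Spec_is_color_texture filename (is_color_texture filename)

-- ===== LEMMAS AND PROOFS =====

-- prepend a list onto the first piece (used to characterize splitOn's accumulator)
def prependPart (pre : List Char) : List (List Char) → List (List Char)
  | [] => [pre]
  | h :: t => (pre ++ h) :: t

-- structural form of splitting on the underscore separator
def mySplit : List Char → List (List Char)
  | [] => [[]]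
  | c :: t => if c = '_' then [] :: mySplit t else prependPart [c] (mySplit t)

-- '_'.join, structurally
def joinSep : List (List Char) → List Char
  | [] => []
  | p :: ps => match ps with
    | [] => p
    | _ :: _ => p ++ '_' :: joinSep ps

lemma joinSep_cons_cons (p q : List Char) (ps : List (List Char)) :
    joinSep (p :: q :: ps) = p ++ '_' :: joinSep (q :: ps) := rfl

lemma mySplit_ne_nil (s : List Char) : mySplit s ≠ [] := by
  cases s with
  | nil => simp [mySplit]
  | cons c t =>
    simp only [mySplit]
    split
    · simp
    · cases h : mySplit t <;> simp [prependPart]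

lemma prependPart_append (a b : List Char) (ps : List (List Char)) :
    prependPart (a ++ b) ps = prependPart a (prependPart b ps) := by
  cases ps <;> simp [prependPart]

lemma splitOn_go_spec : ∀ (fuel : Nat) (l cur : List Char) (acc : List (List Char)),
    l.length < fuel →
    PySem.Chars.splitOn.go ['_'] fuel l cur acc = acc.reverse ++ prependPart cur.reverse (mySplit l) := by
  intro fuel
  induction fuel with
  | zero => intro l cur acc h; omega
  | succ f ih =>
    intro l cur acc h
    cases l with
    | nil =>
      simp [PySem.Chars.splitOn.go, mySplit, prependPart]
    | cons c rest =>
      rw [PySem.Chars.splitOn.go]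
      by_cases hc : c = '_'
      · subst hc
        simp only [List.isPrefixOf, BEq.rfl, Bool.and_true, if_true, List.length_cons,
          List.drop_succ_cons, List.length_nil, List.drop_zero]
        rw [ih rest [] (cur.reverse :: acc) (by simpa using Nat.lt_of_succ_lt_succ h)]
        cases hms : mySplit rest with
        | nil => exact absurd hms (mySplit_ne_nil rest)
        | cons p ps => simp [mySplit, prependPart, hms]
      · have hpre : List.isPrefixOf ['_'] (c :: rest) = false := by
          simp only [List.isPrefixOf, Bool.and_true, beq_eq_false_iff_ne, ne_eq]
          exact fun h => hc h.symm
        simp only [hpre, Bool.false_eq_true, if_false]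
        rw [ih rest (c :: cur) acc (by simpa using Nat.lt_of_succ_lt_succ h)]
        simp only [mySplit, hc, if_false, List.reverse_cons]
        rw [prependPart_append]

lemma splitOn_singleton (s : List Char) :
    PySem.Chars.splitOn s ['_'] = mySplit s := by
  rw [PySem.Chars.splitOn, splitOn_go_spec (s.length + 1) s [] [] (by omega)]
  cases hms : mySplit s with
  | nil => exact absurd hms (mySplit_ne_nil s)
  | cons p ps => simp [prependPart]

lemma joinSep_mySplit (s : List Char) : joinSep (mySplit s) = s := by
  induction s with
  | nil => simp [mySplit, joinSep]
  | cons c t ih =>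
    simp only [mySplit]
    by_cases hc : c = '_'
    · subst hc
      simp only [if_true]
      cases hms : mySplit t with
      | nil => exact absurd hms (mySplit_ne_nil t)
      | cons p ps => rw [hms] at ih; rw [joinSep_cons_cons]; simp [ih]
    · simp only [hc, if_false]
      cases hms : mySplit t with
      | nil => exact absurd hms (mySplit_ne_nil t)
      | cons p ps =>
        rw [hms] at ih
        cases ps <;> simpa [prependPart, joinSep] using ih

-- a '_'-free prefix of l ++ '_' :: r is a prefix of l
lemma prefix_of_sepfree : ∀ (k l r : List Char), '_' ∉ k → k <+: l ++ '_' :: r → k <+: l := by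
  intro k
  induction k with
  | nil => intro l r _ _; exact List.nil_prefix
  | cons a k' ih =>
    intro l r hmem hp
    cases l with
    | nil =>
      simp only [List.nil_append] at hp
      obtain ⟨ha, -⟩ := (List.cons_prefix_cons.mp hp)
      exact absurd (ha ▸ List.mem_cons_self) hmem
    | cons b l' =>
      obtain ⟨ha, hk⟩ := List.cons_prefix_cons.mp hp
      exact List.cons_prefix_cons.mpr ⟨ha, ih l' r (fun h => hmem (List.mem_cons_of_mem _ h)) hk⟩

-- a '_'-free infix of l ++ '_' :: r is an infix of l or of r
lemma infix_sep_split (kw : List Char) (hmem : '_' ∉ kw) :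
    ∀ (l r : List Char), kw <:+: l ++ '_' :: r ↔ kw <:+: l ∨ kw <:+: r := by
  intro l
  induction l with
  | nil =>
    intro r
    constructor
    · intro h
      simp only [List.nil_append] at h
      rcases List.infix_cons_iff.mp h with hp | hi
      · exact Or.inl (List.infix_nil.mpr (by
          cases kw with
          | nil => rfl
          | cons a k' =>
            obtain ⟨ha, -⟩ := List.cons_prefix_cons.mp hp
            exact absurd (ha ▸ List.mem_cons_self) hmem))
      · exact Or.inr hi
    · rintro (h | h)
      · rw [List.infix_nil.mp h]; exact List.nil_infix
      · exact h.trans (List.suffix_cons '_' r).isInfix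
  | cons b l' ih =>
    intro r
    constructor
    · intro h
      rcases List.infix_cons_iff.mp h with hp | hi
      · exact Or.inl (prefix_of_sepfree kw (b :: l') r hmem hp).isInfix
      · rcases (ih r).mp hi with h1 | h2
        · exact Or.inl (h1.trans (List.infix_cons (List.infix_refl l')))
        · exact Or.inr h2
    · rintro (h | h)
      · exact h.trans (List.prefix_append (b :: l') ('_' :: r)).isInfix
      · exact h.trans ((List.suffix_cons '_' r).isInfix.trans
          (List.suffix_append (b :: l') ('_' :: r)).isInfix)

lemma infix_join_iff (kw : List Char) (hne : kw ≠ []) (hmem : '_' ∉ kw) :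
    ∀ (parts : List (List Char)), kw <:+: joinSep parts ↔ ∃ p ∈ parts, kw <:+: p := by
  intro parts
  induction parts with
  | nil => simp [joinSep, List.infix_nil, hne]
  | cons p ps ih =>
    cases ps with
    | nil => simp [joinSep]
    | cons q ps' =>
      rw [joinSep_cons_cons, infix_sep_split kw hmem, ih]
      simp only [List.mem_cons]
      constructor
      · rintro (h | ⟨x, hx, hkx⟩)
        · exact ⟨p, Or.inl rfl, h⟩
        · exact ⟨x, Or.inr hx, hkx⟩
      · rintro ⟨x, (rfl | hx), hkx⟩
        · exact Or.inl hkx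
        · exact Or.inr ⟨x, hx, hkx⟩

lemma keywords_sepfree : ∀ kw ∈ colorKeywords, kw ≠ [] ∧ '_' ∉ kw := by decide

-- A's whole body, reduced to: some keyword is an infix of the normalized string
lemma any_parts_eq (s : List Char) :
    (mySplit s).any (fun part => colorKeywords.any (fun kw => PySem.Chars.isIn kw part)) =
      colorKeywords.any (fun kw => PySem.Chars.isIn kw s) := by
  rw [Bool.eq_iff_iff]
  simp only [List.any_eq_true, PySem.Chars.isIn_iff_infix]
  constructor
  · rintro ⟨part, hpart, kw, hkw, hin⟩
    refine ⟨kw, hkw, ?_⟩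
    obtain ⟨hne, hmem⟩ := keywords_sepfree kw hkw
    rw [← joinSep_mySplit s, infix_join_iff kw hne hmem]
    exact ⟨part, hpart, hin⟩
  · rintro ⟨kw, hkw, hin⟩
    obtain ⟨hne, hmem⟩ := keywords_sepfree kw hkw
    rw [← joinSep_mySplit s, infix_join_iff kw hne hmem] at hin
    obtain ⟨part, hpart, hkp⟩ := hin
    exact ⟨part, hpart, kw, hkw, hkp⟩

-- single-character replace is a map
lemma repl_go (old new : Char) : ∀ (fuel : Nat) (l acc : List Char), l.length ≤ fuel →
    PySem.Chars.replace.go [old] [new] fuel l acc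
      = acc.reverse ++ l.map (fun c => if c = old then new else c) := by
  intro fuel
  induction fuel with
  | zero =>
    intro l acc h
    interval_cases hl : l.length
    simp_all [PySem.Chars.replace.go, List.length_eq_zero_iff.mp hl]
  | succ f ih =>
    intro l acc h
    cases l with
    | nil => simp [PySem.Chars.replace.go]
    | cons c t =>
      rw [PySem.Chars.replace.go]
      by_cases hc : c = old
      · subst hc
        simp only [List.isPrefixOf, BEq.rfl, Bool.and_true, if_true, List.length_singleton,
          List.drop_succ_cons, List.drop_zero]
        rw [ih t _ (by simpa using h)]
        simp
      · have : List.isPrefixOf [old] (c :: t) = false := by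
          simp only [List.isPrefixOf, Bool.and_true, beq_eq_false_iff_ne, ne_eq]
          exact fun h => hc h.symm
        simp only [this, Bool.false_eq_true, if_false]
        rw [ih t _ (by simpa using h)]
        simp [hc]

lemma replace_single (l : List Char) (old new : Char) :
    PySem.Chars.replace l [old] [new] = l.map (fun c => if c = old then new else c) := by
  simp [PySem.Chars.replace, repl_go old new l.length l [] le_rfl]

-- A's three normalization passes are one map of normChar
lemma passes_eq_map_norm (l : List Char) :
    PySem.Chars.replace (PySem.Chars.replace (PySem.Chars.lower l) ['-'] ['_']) ['.'] ['_']
      = l.map normChar := by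
  simp only [PySem.Chars.lower, replace_single, List.map_map]
  refine List.map_congr_left (fun c _ => ?_)
  simp only [Function.comp, normChar]
  split_ifs with h1 h2 h3 h4 <;> simp_all

-- matchesAt is a prefix test against the normalized suffix
lemma matchesAt_iff : ∀ (kw t : List Char), matchesAt kw t = true ↔ kw <+: t.map normChar := by
  intro kw
  induction kw with
  | nil => intro t; simp [matchesAt, List.nil_prefix]
  | cons k kt ih =>
    intro t
    cases t with
    | nil => simp [matchesAt]
    | cons c ct =>
      simp only [matchesAt, Bool.and_eq_true, beq_iff_eq, List.map_cons,
        List.cons_prefix_cons, ih]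
      exact ⟨fun ⟨h1, h2⟩ => ⟨h1.symm, h2⟩, fun ⟨h1, h2⟩ => ⟨h1.symm, h2⟩⟩

-- the scanner finds exactly the keywords occurring as an infix of the normalized string
lemma colorScan_eq (l : List Char) :
    colorScan l = bColorKws.any (fun kw => PySem.Chars.isIn kw (l.map normChar)) := by
  rw [Bool.eq_iff_iff]
  simp only [List.any_eq_true, ← PySem.Chars.exists_prefix_drop_iff_isIn]
  induction l with
  | nil =>
    simp only [colorScan, List.any_eq_true, matchesAt_iff]
    constructor
    · rintro ⟨kw, hkw, hp⟩; exact ⟨kw, hkw, 0, by simpa using hp⟩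
    · rintro ⟨kw, hkw, j, hp⟩; exact ⟨kw, hkw, by simpa using hp⟩
  | cons c t ih =>
    simp only [colorScan, Bool.or_eq_true, List.any_eq_true, matchesAt_iff]
    constructor
    · rintro (⟨kw, hkw, hp⟩ | hscan)
      · exact ⟨kw, hkw, 0, by simpa using hp⟩
      · obtain ⟨kw, hkw, j, hp⟩ := ih.mp hscan
        exact ⟨kw, hkw, j + 1, by simpa using hp⟩
    · rintro ⟨kw, hkw, j, hp⟩
      cases j with
      | zero => exact Or.inl ⟨kw, hkw, by simpa using hp⟩
      | succ j' => exact Or.inr (ih.mpr ⟨kw, hkw, j', by simpa using hp⟩)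

lemma kws_lists_eq : bColorKws = colorKeywords := by decide

-- ===== VERDICT (by name: the statement is the Claim_ definition above) =====
theorem is_color_texture_spec : Claim_equal_is_color_texture := by
  intro filename _
  simp only [Spec_is_color_texture, is_color_texture, is_color_texture_alt,
    splitOn_singleton, any_parts_eq, passes_eq_map_norm, colorScan_eq, kws_lists_eq]
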